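-- pv_equiv track=rewrite | github.com/KingPsychopath/backend-dev | Languages and Tools/Python/Projects/Room Painter/room_painter.py | best_paint_option
-- ===== SOURCE A (Python) =====
-- import math
--
-- paints = {
--     'premium': {'coverage_rate': 400, 'price': 50, 'volume': 4},
--     'standard': {'coverage_rate': 250, 'price': 30, 'volume': 5},
--     'economy': {'coverage_rate': 75, 'price': 20, 'volume': 10},
-- }
--
-- def best_paint_option(total_area):
--     min_cost = float('inf')
--     best_option = None
--
--     for num_premium in range(math.ceil(total_area / paints['premium']['coverage_rate']) + 1):
--         for num_standard in range(math.ceil(total_area / paints['standard']['coverage_rate']) + 1):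
--             for num_economy in range(math.ceil(total_area / paints['economy']['coverage_rate']) + 1):
--                 total_coverage = num_premium * paints['premium']['coverage_rate'] + num_standard * paints['standard']['coverage_rate'] + num_economy * paints['economy']['coverage_rate']
--                 total_cost = num_premium * paints['premium']['price'] + num_standard * paints['standard']['price'] + num_economy * paints['economy']['price']
--
--                 if total_coverage >= total_area and total_cost < min_cost:
--                     min_cost = total_cost
--                     best_option = {'premium': num_premium, 'standard': num_standard, 'economy': num_economy}
--
--     return best_option
-- ===== SOURCE B (Python) =====
-- def best_paint_option(total_area):
--     # Drop A's inner loop: for each (premium, standard) pair the cheapest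
--     # feasible economy count is forced, so compute it directly in O(A^2).
--     min_cost = None
--     best_option = None
--     for num_premium in range(-(-total_area // 400) + 1):
--         for num_standard in range(-(-total_area // 250) + 1):
--             covered = 400 * num_premium + 250 * num_standard
--             num_economy = max(0, -((covered - total_area) // 75))
--             cost = 50 * num_premium + 30 * num_standard + 20 * num_economy
--             if min_cost is None or cost < min_cost:
--                 min_cost = cost
--                 best_option = {'premium': num_premium,
--                                'standard': num_standard,
--                                'economy': num_economy}
--     return best_option
-- ===== Notes on version B (the rewrite author's own statement) =====
-- stated objective: faster
-- what changed: The inner economy loop is removed: for each (premium, standard) pair the minimal feasible economy count is computed in closed form by ceiling division, turning the triple loop into a double loop.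
-- intended difference: For total_area in [-249,-75] A returns None because its economy range(ceil(area/75)+1) is empty while the other ranges are not, an artifact of the range bounds; B returns the zero-cans option {premium:0, standard:0, economy:0}, matching A's own zero-cans answer on slightly less negative areas, which is the intended value since no paint is needed for nonpositive area. — e.g. on best_paint_option(-100): A returns none, B returns some [("premium", 0), ("standard", 0), ("economy", 0)]
import Mathlib
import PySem

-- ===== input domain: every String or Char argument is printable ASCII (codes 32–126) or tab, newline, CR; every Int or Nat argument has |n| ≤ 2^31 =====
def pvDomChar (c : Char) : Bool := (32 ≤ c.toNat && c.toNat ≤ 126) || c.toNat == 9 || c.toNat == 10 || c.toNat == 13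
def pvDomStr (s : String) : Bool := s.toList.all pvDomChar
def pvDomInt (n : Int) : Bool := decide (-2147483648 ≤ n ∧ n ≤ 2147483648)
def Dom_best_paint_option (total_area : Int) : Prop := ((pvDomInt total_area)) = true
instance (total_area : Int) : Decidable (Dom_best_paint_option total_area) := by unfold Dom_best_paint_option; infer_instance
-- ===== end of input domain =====

-- B removes A's inner economy loop: the cheapest feasible economy count per (premium, standard)
-- pair is computed in closed form by ceiling division (O(A^2) instead of A's O(A^3)).
-- math.ceil(x / d) on |x| ≤ 2^31 equals integer ceiling -((-x) // d) exactly (double rounding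
-- error cannot cross an integer at this magnitude), so both ports use -(floordiv (-x) d).

-- ===== PORT A =====
-- min_cost = float('inf') is represented as `none : Option Int` (inf), `some c` otherwise;
-- `total_cost < min_cost` is the match below (always true against inf).
def pvStepE_A (total_area num_premium num_standard : Int)
    (st : Option Int × Option (List (String × Int))) (num_economy : Int) :
    Option Int × Option (List (String × Int)) :=
  let total_coverage := num_premium * 400 + num_standard * 250 + num_economy * 75
  let total_cost := num_premium * 50 + num_standard * 30 + num_economy * 20
  if decide (total_coverage ≥ total_area) &&
      (match st.1 with | none => true | some min_cost => decide (total_cost < min_cost)) then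
    (some total_cost,
     some [("premium", num_premium), ("standard", num_standard), ("economy", num_economy)])
  else st

def pvStepS_A (total_area num_premium : Int)
    (st : Option Int × Option (List (String × Int))) (num_standard : Int) :
    Option Int × Option (List (String × Int)) :=
  (PySem.List.pyRange 0 (-(PySem.Int.floordiv (-total_area) 75) + 1) 1).foldl
    (pvStepE_A total_area num_premium num_standard) st

def pvStepP_A (total_area : Int)
    (st : Option Int × Option (List (String × Int))) (num_premium : Int) :
    Option Int × Option (List (String × Int)) :=
  (PySem.List.pyRange 0 (-(PySem.Int.floordiv (-total_area) 250) + 1) 1).foldl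
    (pvStepS_A total_area num_premium) st

def best_paint_option (total_area : Int) : Option (List (String × Int)) :=
  ((PySem.List.pyRange 0 (-(PySem.Int.floordiv (-total_area) 400) + 1) 1).foldl
    (pvStepP_A total_area) (none, none)).2

-- ===== PORT B =====
-- min_cost = None is `none : Option Int`; "min_cost is None or cost < min_cost" is the match.
def pvStepS_B (total_area num_premium : Int)
    (st : Option Int × Option (List (String × Int))) (num_standard : Int) :
    Option Int × Option (List (String × Int)) :=
  let covered := 400 * num_premium + 250 * num_standard
  let num_economy := max 0 (-(PySem.Int.floordiv (covered - total_area) 75))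
  let cost := 50 * num_premium + 30 * num_standard + 20 * num_economy
  if (match st.1 with | none => true | some min_cost => decide (cost < min_cost)) then
    (some cost,
     some [("premium", num_premium), ("standard", num_standard), ("economy", num_economy)])
  else st

def pvStepP_B (total_area : Int)
    (st : Option Int × Option (List (String × Int))) (num_premium : Int) :
    Option Int × Option (List (String × Int)) :=
  (PySem.List.pyRange 0 (-(PySem.Int.floordiv (-total_area) 250) + 1) 1).foldl
    (pvStepS_B total_area num_premium) st

def best_paint_option_alt (total_area : Int) : Option (List (String × Int)) :=
  ((PySem.List.pyRange 0 (-(PySem.Int.floordiv (-total_area) 400) + 1) 1).foldl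
    (pvStepP_B total_area) (none, none)).2

-- ===== PRECONDITION & SPEC =====
-- For total_area in [-249,-75] A returns None because its economy range(ceil(area/75)+1) is
-- empty while the other two ranges are not (an artifact of the range bounds); B returns the
-- zero-cans option, matching A's own zero-cans answer on slightly less negative areas — the
-- intended value, since no paint is needed for a nonpositive area.
def D_best_paint_option (total_area : Int) : Prop := -249 ≤ total_area ∧ total_area ≤ -75
instance (total_area : Int) : Decidable (D_best_paint_option total_area) := by
  unfold D_best_paint_option; infer_instance

def Spec_best_paint_option (total_area : Int) (out : Option (List (String × Int))) : Prop :=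
  ¬ D_best_paint_option total_area → out = best_paint_option_alt total_area
instance (total_area : Int) (out : Option (List (String × Int))) :
    Decidable (Spec_best_paint_option total_area out) := by
  unfold Spec_best_paint_option; infer_instance

def pvDiffWitness_best_paint_option : Int := -100
def pvDiffWitnessOut_best_paint_option :
    (Option (List (String × Int))) × (Option (List (String × Int))) :=
  (none, some [("premium", 0), ("standard", 0), ("economy", 0)])

-- ===== CLAIM =====
def Claim_unchanged_best_paint_option : Prop :=
  ∀ (total_area : Int), Dom_best_paint_option total_area →
    Spec_best_paint_option total_area (best_paint_option total_area)
def Claim_changed_best_paint_option : Prop :=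
  Dom_best_paint_option (pvDiffWitness_best_paint_option) ∧
  D_best_paint_option (pvDiffWitness_best_paint_option) ∧
  best_paint_option (pvDiffWitness_best_paint_option) = pvDiffWitnessOut_best_paint_option.1 ∧
  best_paint_option_alt (pvDiffWitness_best_paint_option) = pvDiffWitnessOut_best_paint_option.2 ∧
  pvDiffWitnessOut_best_paint_option.1 ≠ pvDiffWitnessOut_best_paint_option.2
def Claim_exact_best_paint_option : Prop :=
  ∀ (total_area : Int), Dom_best_paint_option total_area → D_best_paint_option total_area →
    best_paint_option total_area ≠ best_paint_option_alt total_area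

-- ===== LEMMAS AND PROOFS =====

theorem pv_foldl_id_of_fix {α β : Type} (f : β → α → β) (l : List α) (st : β)
    (h : ∀ x ∈ l, f st x = st) : l.foldl f st = st := by
  induction l with
  | nil => rfl
  | cons a t ih =>
      simp only [List.foldl_cons, h a (by simp)]
      exact ih (fun x hx => h x (by simp [hx]))

theorem pv_fd75 (x : Int) : PySem.Int.floordiv x 75 = x / 75 :=
  PySem.Int.floordiv_eq_ediv_of_pos (by norm_num)
theorem pv_fd250 (x : Int) : PySem.Int.floordiv x 250 = x / 250 :=
  PySem.Int.floordiv_eq_ediv_of_pos (by norm_num)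
theorem pv_fd400 (x : Int) : PySem.Int.floordiv x 400 = x / 400 :=
  PySem.Int.floordiv_eq_ediv_of_pos (by norm_num)

-- the inner economy loop of A equals B's closed-form single update
theorem pv_inner_eq (a p s : Int) (ha : -74 ≤ a) (hp : 0 ≤ p) (hs : 0 ≤ s)
    (st : Option Int × Option (List (String × Int))) :
    pvStepS_A a p st s = pvStepS_B a p st s := by
  obtain ⟨q, hq⟩ : ∃ q, max 0 (-(PySem.Int.floordiv (400 * p + 250 * s - a) 75)) = q := ⟨_, rfl⟩
  have hqchar : q = max 0 (-((400 * p + 250 * s - a) / 75)) := by rw [← hq, pv_fd75]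
  have hemax : -(PySem.Int.floordiv (-a) 75) = -((-a) / 75) := by rw [pv_fd75]
  have hb1 : 0 ≤ q := by omega
  have hb2 : q ≤ -(PySem.Int.floordiv (-a) 75) := by rw [hemax]; omega
  have hcovge : a ≤ p * 400 + s * 250 + q * 75 := by omega
  unfold pvStepS_A
  rw [PySem.List.pyRange_one_append 0 q (-(PySem.Int.floordiv (-a) 75) + 1) hb1 (by omega),
      List.foldl_append,
      PySem.List.pyRange_one_cons (show q < -(PySem.Int.floordiv (-a) 75) + 1 by omega),
      List.foldl_cons]
  -- prefix [0, q): coverage too small, every step is the identity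
  rw [pv_foldl_id_of_fix _ _ st (by
    intro e he
    have hmem := PySem.List.mem_pyRange_one.mp he
    have hcov : ¬ (p * 400 + s * 250 + e * 75 ≥ a) := by omega
    simp [pvStepE_A, hcov])]
  -- the step at q is exactly B's update
  have hstep : pvStepE_A a p s st q = pvStepS_B a p st s := by
    have hcost : p * 50 + s * 30 + q * 20 = 50 * p + 30 * s + 20 * q := by ring
    simp only [pvStepE_A, pvStepS_B, hq, decide_eq_true (show p * 400 + s * 250 + q * 75 ≥ a from hcovge),
      Bool.true_and, hcost]
  rw [hstep]
  -- suffix (q, emax]: cost only grows, no further update fires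
  have hmc : ∃ c, (pvStepS_B a p st s).1 = some c ∧ c ≤ 50 * p + 30 * s + 20 * q := by
    simp only [pvStepS_B, hq]
    rcases h1 : st.1 with _ | c
    · simp
    · by_cases hlt : 50 * p + 30 * s + 20 * q < c
      · simp [hlt]
      · simp [h1, hlt]
        omega
  apply pv_foldl_id_of_fix
  intro e he
  obtain ⟨c, hc1, hc2⟩ := hmc
  have hmem := PySem.List.mem_pyRange_one.mp he
  have hnlt : ¬ (p * 50 + s * 30 + e * 20 < c) := by omega
  simp [pvStepE_A, hc1, hnlt]

-- A = B on every total_area ≥ -74 (all three loops present and aligned)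
theorem pv_main_eq (a : Int) (ha : -74 ≤ a) :
    best_paint_option a = best_paint_option_alt a := by
  unfold best_paint_option best_paint_option_alt
  congr 1
  apply PySem.List.foldl_congr_mem
  intro st p hpmem
  have hp : 0 ≤ p := (PySem.List.mem_pyRange_one.mp hpmem).1
  unfold pvStepP_A pvStepP_B
  apply PySem.List.foldl_congr_mem
  intro st' s hsmem
  have hs : 0 ≤ s := (PySem.List.mem_pyRange_one.mp hsmem).1
  exact pv_inner_eq a p s ha hp hs st'

-- A = B = none on every total_area ≤ -250 (the standard range is empty on both sides)
theorem pv_both_none (a : Int) (ha : a ≤ -250) :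
    best_paint_option a = best_paint_option_alt a := by
  have hs : PySem.List.pyRange 0 (-(PySem.Int.floordiv (-a) 250) + 1) 1 = [] := by
    apply PySem.List.pyRange_one_eq_nil
    rw [pv_fd250]; omega
  unfold best_paint_option best_paint_option_alt
  rw [pv_foldl_id_of_fix _ _ _ (by intro p _; unfold pvStepP_A; rw [hs]; rfl),
      pv_foldl_id_of_fix _ _ _ (by intro p _; unfold pvStepP_B; rw [hs]; rfl)]

-- inside D_ : A's economy range is empty so A = none, while B returns the zero-cans option
theorem pv_inside_D (a : Int) (h1 : -249 ≤ a) (h2 : a ≤ -75) :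
    best_paint_option a = none ∧
    best_paint_option_alt a = some [("premium", 0), ("standard", 0), ("economy", 0)] := by
  have hp : PySem.List.pyRange 0 (-(PySem.Int.floordiv (-a) 400) + 1) 1 = [0] := by
    have : -(PySem.Int.floordiv (-a) 400) + 1 = 0 + 1 := by rw [pv_fd400]; omega
    rw [this]; exact PySem.List.pyRange_one_singleton 0
  have hs : PySem.List.pyRange 0 (-(PySem.Int.floordiv (-a) 250) + 1) 1 = [0] := by
    have : -(PySem.Int.floordiv (-a) 250) + 1 = 0 + 1 := by rw [pv_fd250]; omega
    rw [this]; exact PySem.List.pyRange_one_singleton 0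
  have he : PySem.List.pyRange 0 (-(PySem.Int.floordiv (-a) 75) + 1) 1 = [] := by
    apply PySem.List.pyRange_one_eq_nil
    rw [pv_fd75]; omega
  constructor
  · unfold best_paint_option
    rw [hp]
    simp only [List.foldl_cons, List.foldl_nil]
    unfold pvStepP_A
    rw [hs]
    simp only [List.foldl_cons, List.foldl_nil]
    unfold pvStepS_A
    rw [he]
    rfl
  · unfold best_paint_option_alt
    rw [hp]
    simp only [List.foldl_cons, List.foldl_nil]
    unfold pvStepP_B
    rw [hs]
    simp only [List.foldl_cons, List.foldl_nil, pvStepS_B]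
    have he0 : max 0 (-(PySem.Int.floordiv (400 * (0:Int) + 250 * 0 - a) 75)) = 0 := by
      rw [pv_fd75]; omega
    rw [he0]
    simp

-- ===== VERDICT =====
theorem best_paint_option_spec : Claim_unchanged_best_paint_option := by
  intro a _ hD
  unfold D_best_paint_option at hD
  by_cases h : -74 ≤ a
  · exact pv_main_eq a h
  · exact pv_both_none a (by omega)

theorem best_paint_option_changed : Claim_changed_best_paint_option := by
  unfold Claim_changed_best_paint_option
  refine ⟨by decide, by decide, ?_, ?_, by decide⟩
  · exact (pv_inside_D (-100) (by norm_num) (by norm_num)).1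
  · exact (pv_inside_D (-100) (by norm_num) (by norm_num)).2

theorem best_paint_option_tight : Claim_exact_best_paint_option := by
  intro a _ hD
  obtain ⟨h1, h2⟩ := hD
  obtain ⟨hA, hB⟩ := pv_inside_D a h1 h2
  rw [hA, hB]
  simp
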